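-- pv_equiv track=rewrite | github.com/thatsabhishek/Coding_Ninjas_DSA_in_Python | Milestone 2/Functions/FibonacciMember.py | checkMember
-- ===== SOURCE A (Python) =====
-- def checkMember(n):
--     sum = 0
--     a = 0
--     b = 1
--     N = n
--     while n!=0:
--         sum = a+b
--         a = b
--         b = sum
--         n=n-1
--         if sum == N:
--             return True
--         else:
--             continue
--     if sum == N:
--         return True
--     else:
--         return False
-- ===== SOURCE B (Python) =====
-- def checkMember(n):
--     a, b = 0, 1
--     while b < n:
--         a, b = b, a + b
--     return n == a or n == b
-- ===== Notes on version B (the rewrite author's own statement) =====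
-- stated objective: faster
-- what changed: A counts down n times, recomputing Fibonacci sums and testing each against n; B advances the Fibonacci pair only until it reaches n and does one membership check at the end (O(log n) iterations).
import Mathlib
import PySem

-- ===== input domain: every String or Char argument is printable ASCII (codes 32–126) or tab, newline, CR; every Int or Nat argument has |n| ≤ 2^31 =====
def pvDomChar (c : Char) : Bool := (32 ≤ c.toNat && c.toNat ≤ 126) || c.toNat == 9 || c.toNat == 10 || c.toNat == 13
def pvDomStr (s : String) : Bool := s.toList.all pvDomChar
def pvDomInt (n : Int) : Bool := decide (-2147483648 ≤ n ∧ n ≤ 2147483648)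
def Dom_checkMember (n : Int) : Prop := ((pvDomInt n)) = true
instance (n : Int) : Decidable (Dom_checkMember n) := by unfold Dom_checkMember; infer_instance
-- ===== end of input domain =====

-- B replaces A's n-step countdown with the standard Fibonacci climb to n: asymptotically faster (O(log n) loop steps).

-- ===== PORT A =====
-- A's while loop decrements n until 0; the countdown is the fuel n.toNat.
def checkMemberLoopA (fuel : Nat) (s a b N : Int) : Bool :=
  match fuel with
  | 0 => s == N
  | f + 1 =>
    let sum := a + b
    if sum == N then true
    else checkMemberLoopA f sum b sum N

def checkMember (n : Int) : Bool := checkMemberLoopA n.toNat 0 0 1 n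

-- ===== PORT B =====
-- B's 'while b < n' loop as structural recursion; fuel n.toNat + 1 bounds the
-- iteration count (b gains at least 1 per step once a ≥ 1), and the fuel-0 case
-- is the loop's own exit result, so the port computes exactly Source B's while loop.
def checkMemberLoopB (fuel : Nat) (n a b : Int) : Bool :=
  match fuel with
  | 0 => (n == a || n == b)
  | f + 1 =>
    if b < n then checkMemberLoopB f n b (a + b)
    else (n == a || n == b)

def checkMember_alt (n : Int) : Bool := checkMemberLoopB (n.toNat + 1) n 0 1

-- ===== PRECONDITION & SPEC =====
-- Pre_ excludes negative inputs, on which Python A's countdown loop never terminates (A returns no value there).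
def Pre_checkMember (n : Int) : Prop := 0 ≤ n
instance (n : Int) : Decidable (Pre_checkMember n) := by unfold Pre_checkMember; infer_instance
def pvWitness_checkMember : Int := (8)

def Spec_checkMember (n : Int) (out : Bool) : Prop := out = checkMember_alt n
instance (n : Int) (out : Bool) : Decidable (Spec_checkMember n out) := by unfold Spec_checkMember; infer_instance

-- ===== CLAIM (what is proved, stated in full; the proofs are below) =====
def Claim_equal_checkMember : Prop := ∀ (n : Int), Dom_checkMember n → Pre_checkMember n → Spec_checkMember n (checkMember n)

-- ===== LEMMAS AND PROOFS =====

-- Once the running Fibonacci value has passed N it never comes back: A's loop returns false.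
theorem loopA_past (f : Nat) : ∀ (a b N : Int), 0 ≤ a → a ≤ b → N < b →
    checkMemberLoopA f b a b N = false := by
  induction f with
  | zero =>
    intro a b N h0 hab hN
    simp only [checkMemberLoopA]
    simp
    omega
  | succ f ih =>
    intro a b N h0 hab hN
    simp only [checkMemberLoopA]
    rw [if_neg (by simp; omega)]
    exact ih b (a + b) N (by omega) (by omega) (by omega)

-- B's loop exits with the membership check as soon as b = N, whatever fuel remains.
theorem loopB_exit (f : Nat) (a N : Int) : checkMemberLoopB f N a N = (N == a || N == N) := by
  cases f with
  | zero => simp [checkMemberLoopB]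
  | succ f => simp [checkMemberLoopB]

-- With sufficient fuel, one more unit of fuel does not change B's loop.
theorem loopB_fuel (f : Nat) : ∀ (a b N : Int), 1 ≤ a → a ≤ b → N ≤ b + f →
    checkMemberLoopB (f + 1) N a b = checkMemberLoopB f N a b := by
  induction f with
  | zero =>
    intro a b N ha hab hf
    simp only [checkMemberLoopB]
    rw [if_neg (by omega)]
  | succ f ih =>
    intro a b N ha hab hf
    by_cases hblt : b < N
    · rw [show f + 1 + 1 = (f + 1) + 1 from rfl]
      simp only [checkMemberLoopB]
      rw [if_pos hblt, if_pos hblt]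
      exact ih b (a + b) N (by omega) (by omega) (by omega)
    · simp only [checkMemberLoopB]
      rw [if_neg hblt, if_neg hblt]

-- Aligned simulation: A's loop state (s = b, a, b) matches B's loop on the same fuel.
theorem loopA_eq_loopB (f : Nat) : ∀ (a b N : Int), 1 ≤ a → a ≤ b → a ≠ N → b ≠ N → N ≤ b + f →
    checkMemberLoopA f b a b N = checkMemberLoopB f N a b := by
  induction f with
  | zero =>
    intro a b N ha hab haN hbN hf
    simp only [checkMemberLoopA, checkMemberLoopB]
    rw [Bool.eq_iff_iff]
    simp
    omega
  | succ f ih =>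
    intro a b N ha hab haN hbN hf
    simp only [checkMemberLoopA, checkMemberLoopB]
    by_cases hsum : a + b = N
    · -- A finds N now; B steps once more, then exits with n == b true
      rw [if_pos (by simp [hsum]), if_pos (by omega)]
      rw [hsum, loopB_exit]
      simp
    · rw [if_neg (by simp [hsum])]
      by_cases hblt : b < N
      · rw [if_pos hblt]
        exact ih b (a + b) N (by omega) (by omega) hbN hsum (by omega)
      · -- N < b already: A keeps climbing and returns false; B exits false
        rw [if_neg hblt]
        rw [loopA_past f b (a + b) N (by omega) (by omega) (by omega)]
        rw [eq_comm, Bool.eq_iff_iff]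
        simp
        omega

-- ===== VERDICT (by name: the statement is the Claim_ definition above) =====
theorem checkMember_spec : Claim_equal_checkMember := by
  intro n _ hpre
  unfold Spec_checkMember checkMember checkMember_alt
  unfold Pre_checkMember at hpre
  by_cases h0 : n = 0
  · subst h0
    simp [checkMemberLoopA, checkMemberLoopB]
  · by_cases h1 : n = 1
    · subst h1
      simp [checkMemberLoopA, checkMemberLoopB]
    · have h2 : 2 ≤ n := by omega
      have hft : n.toNat = (n.toNat - 1) + 1 := by omega
      have hB : checkMemberLoopB (n.toNat + 1) n 0 1 = checkMemberLoopB n.toNat n 1 1 := by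
        rw [show n.toNat + 1 = n.toNat + 1 from rfl, checkMemberLoopB.eq_2]
        rw [if_pos (by omega)]
        norm_num
      rw [hB, hft]
      simp only [checkMemberLoopA]
      rw [if_neg (by simp; omega)]
      norm_num
      rw [loopB_fuel (n.toNat - 1) 1 1 n (by omega) (by omega) (by omega)]
      exact loopA_eq_loopB (n.toNat - 1) 1 1 n (by omega) (by omega) (by omega) (by omega) (by omega)
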